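-- pv_equiv track=rewrite | github.com/martinmromero/EducaApp | analizar_dependencias.py | compare_imports_with_packages
-- ===== SOURCE A (Python) =====
-- def compare_imports_with_packages(imports, installed_packages):
--     used_packages = set()
--     unused_packages = installed_packages.copy()
--
--     for module, count in imports.items():
--         if module in installed_packages:
--             used_packages.add(module)
--             unused_packages.discard(module)
--
--     return used_packages, unused_packages
-- ===== SOURCE B (Python) =====
-- def compare_imports_with_packages(imports, installed_packages):
--     used_packages = {m for m in imports if m in installed_packages}
--     unused_packages = {p for p in installed_packages if p not in imports}
--     return used_packages, unused_packages
-- ===== Notes on version B (the rewrite author's own statement) =====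
-- stated objective: simpler
-- what changed: Replaces the copy-then-discard mutation loop by two independent set comprehensions: used filters the import keys by installed membership, unused filters the installed set by key absence, with no mutable bookkeeping.
import Mathlib
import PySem

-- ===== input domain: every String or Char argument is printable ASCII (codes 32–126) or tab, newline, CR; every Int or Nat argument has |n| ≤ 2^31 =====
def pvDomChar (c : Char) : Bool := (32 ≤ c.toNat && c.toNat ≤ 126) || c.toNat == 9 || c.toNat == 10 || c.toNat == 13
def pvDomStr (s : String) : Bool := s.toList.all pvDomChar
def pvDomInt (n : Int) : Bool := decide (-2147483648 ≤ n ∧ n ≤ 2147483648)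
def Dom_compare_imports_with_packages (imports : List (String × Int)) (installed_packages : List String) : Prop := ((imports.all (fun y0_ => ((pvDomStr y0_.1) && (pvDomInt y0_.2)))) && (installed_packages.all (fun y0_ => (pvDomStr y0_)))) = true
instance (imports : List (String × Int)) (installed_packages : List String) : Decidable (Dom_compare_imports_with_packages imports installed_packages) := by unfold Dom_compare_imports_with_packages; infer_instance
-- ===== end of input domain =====

-- ===== PORT A =====
-- B replaces A's copy-then-discard mutation loop by two independent set comprehensions (objective: simpler).
def compare_imports_with_packages (imports : List (String × Int)) (installed_packages : List String) : List String × List String :=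
  -- used_packages = set(); unused_packages = installed_packages.copy()
  -- for module, count in imports.items(): if module in installed_packages: used.add(module); unused.discard(module)
  imports.foldl
    (fun (st : PySem.Set String × PySem.Set String) (mi : String × Int) =>
      if PySem.Set.contains installed_packages mi.1 then
        (PySem.Set.add st.1 mi.1, PySem.Set.discard st.2 mi.1)
      else st)
    (PySem.Set.empty, installed_packages)

-- ===== PORT B =====
def compare_imports_with_packages_alt (imports : List (String × Int)) (installed_packages : List String) : List String × List String :=
  -- {m for m in imports if m in installed_packages}, {p for p in installed_packages if p not in imports}
  (PySem.Set.ofList ((imports.filter (fun mi => PySem.Set.contains installed_packages mi.1)).map Prod.fst),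
   PySem.Set.ofList (installed_packages.filter (fun p => !(imports.any (fun mi => mi.1 == p)))))

-- ===== PRECONDITION & SPEC =====
-- Pre_ states the representation invariants of the Python argument types only: imports is a dict
-- (distinct keys) and installed_packages is a set (distinct elements); it excludes no genuine Python input.
def Pre_compare_imports_with_packages (imports : List (String × Int)) (installed_packages : List String) : Prop :=
  (imports.map Prod.fst).Nodup ∧ installed_packages.Nodup
instance (imports : List (String × Int)) (installed_packages : List String) : Decidable (Pre_compare_imports_with_packages imports installed_packages) := by unfold Pre_compare_imports_with_packages; infer_instance
def pvWitness_compare_imports_with_packages : (List (String × Int)) × List String :=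
  ([("os", 3), ("json", 1)], ["os", "numpy"])
def Spec_compare_imports_with_packages (imports : List (String × Int)) (installed_packages : List String) (out : List String × List String) : Prop := out = compare_imports_with_packages_alt imports installed_packages
instance (imports : List (String × Int)) (installed_packages : List String) (out : List String × List String) : Decidable (Spec_compare_imports_with_packages imports installed_packages out) := by unfold Spec_compare_imports_with_packages; infer_instance

-- ===== CLAIM (what is proved, stated in full; the proofs are below) =====
def Claim_equal_compare_imports_with_packages : Prop := ∀ (imports : List (String × Int)) (installed_packages : List String), Dom_compare_imports_with_packages imports installed_packages → Pre_compare_imports_with_packages imports installed_packages → Spec_compare_imports_with_packages imports installed_packages (compare_imports_with_packages imports installed_packages)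

-- ===== LEMMAS AND PROOFS =====

theorem discard_eq_filter (s : List String) (x : String) :
    PySem.Set.discard s x = s.filter (fun y => !(y == x)) := by
  simp [PySem.Set.discard]

theorem fst_loop (inst : List String) (ks : List (String × Int)) :
    ∀ (u r : List String),
      (ks.foldl
        (fun (st : PySem.Set String × PySem.Set String) (mi : String × Int) =>
          if PySem.Set.contains inst mi.1 then
            (PySem.Set.add st.1 mi.1, PySem.Set.discard st.2 mi.1)
          else st) (u, r)).1
      = (ks.filter (fun mi => PySem.Set.contains inst mi.1)).foldl
          (fun (s : PySem.Set String) (mi : String × Int) => PySem.Set.add s mi.1) u := by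
  induction ks with
  | nil => intro u r; rfl
  | cons k ks ih =>
    intro u r
    by_cases h : PySem.Set.contains inst k.1 = true
    · rw [List.foldl_cons, if_pos h, List.filter_cons_of_pos (by exact h), List.foldl_cons, ih]
    · rw [List.foldl_cons, if_neg h, List.filter_cons_of_neg (by exact h), ih]

theorem snd_loop (inst : List String) (ks : List (String × Int)) :
    ∀ (u r : List String),
      (ks.foldl
        (fun (st : PySem.Set String × PySem.Set String) (mi : String × Int) =>
          if PySem.Set.contains inst mi.1 then
            (PySem.Set.add st.1 mi.1, PySem.Set.discard st.2 mi.1)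
          else st) (u, r)).2
      = r.filter (fun p => !(ks.any (fun mi => mi.1 == p && PySem.Set.contains inst mi.1))) := by
  induction ks with
  | nil => intro u r; simp
  | cons k ks ih =>
    intro u r
    by_cases h : PySem.Set.contains inst k.1 = true
    · rw [List.foldl_cons, if_pos h, ih, discard_eq_filter, List.filter_filter]
      apply List.filter_congr
      intro p _
      rw [List.any_cons]
      have hm : k.1 ∈ inst := by simpa [PySem.Set.contains_iff] using h
      by_cases hkp : k.1 = p
      · subst hkp
        simp [hm]
      · have hb : (k.1 == p) = false := by simpa using hkp
        have hb' : (p == k.1) = false := by simpa using (Ne.symm hkp)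
        simp [hb, hb']
    · rw [List.foldl_cons, if_neg h, ih]
      apply List.filter_congr
      intro p _
      rw [List.any_cons]
      have hm : k.1 ∉ inst := fun hmem => h (by simpa [PySem.Set.contains_iff] using hmem)
      by_cases hkp : k.1 = p
      · subst hkp; simp [hm]
      · have hb : (k.1 == p) = false := by simpa using hkp
        simp [hb]

theorem fst_alt (inst : List String) (ks : List (String × Int)) :
    PySem.Set.ofList ((ks.filter (fun mi => PySem.Set.contains inst mi.1)).map Prod.fst)
      = (ks.filter (fun mi => PySem.Set.contains inst mi.1)).foldl
          (fun (s : PySem.Set String) (mi : String × Int) => PySem.Set.add s mi.1) PySem.Set.empty := by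
  rw [← PySem.Set.update_empty, PySem.Set.update_map_eq_foldl_add]

-- ===== VERDICT (by name: the statement is the Claim_ definition above) =====
theorem compare_imports_with_packages_spec : Claim_equal_compare_imports_with_packages := by
  intro imports inst _hDom hPre
  unfold Spec_compare_imports_with_packages
  unfold compare_imports_with_packages compare_imports_with_packages_alt
  refine Prod.ext ?_ ?_
  · dsimp only
    rw [fst_loop, fst_alt]
  · dsimp only
    rw [snd_loop, PySem.Set.ofList_eq_self_of_nodup _ (hPre.2.filter _)]
    apply List.filter_congr
    intro p hp
    congr 1
    apply List.any_congr rfl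
    intro mi
    by_cases hmp : mi.1 = p
    · subst hmp; simp [hp]
    · have hb : (mi.1 == p) = false := by simpa using hmp
      simp [hb]
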